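-- pv_equiv track=rewrite | github.com/acchow/seadoo | parse/model.py | extract_constants
-- ===== SOURCE A (Python) =====
-- def extract_constants(lines):
--     unique_constants = []
--     for line in lines:
--         if "(" in line and "formulas(assumptions)" not in line and "end_of_list" not in line:
--             for c in range(line.index("(")+1, line.index(")")-1, 1):
--                 while line[c] != "," and line[c] not in unique_constants:
--                     unique_constants.append(line[c])
--     return unique_constants
-- ===== SOURCE B (Python) =====
-- def extract_constants(lines):
--     # Gather the comma-free candidate characters of every qualifying line.
--     candidates = []
--     for line in lines:
--         if "(" in line and "formulas(assumptions)" not in line and "end_of_list" not in line: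
--             start = line.index("(") + 1
--             stop = max(line.index(")") - 1, 0)  # non-negative stop: empty when ')' precedes '('
--             candidates.extend(c for c in line[start:stop] if c != ",")
--     # Dedup with an unordered set; recover first-occurrence order by sorting on first index.
--     return sorted(set(candidates), key=candidates.index)
-- ===== Notes on version B (the rewrite author's own statement) =====
-- stated objective: alternative
-- what changed: Drops A's incremental ordered-list dedup (append-if-not-member while scanning): B gathers the comma-free slice characters of qualifying lines, dedups them with an unordered set, and reconstructs the first-occurrence order by sorting the set on candidates.index.
import Mathlib
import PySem

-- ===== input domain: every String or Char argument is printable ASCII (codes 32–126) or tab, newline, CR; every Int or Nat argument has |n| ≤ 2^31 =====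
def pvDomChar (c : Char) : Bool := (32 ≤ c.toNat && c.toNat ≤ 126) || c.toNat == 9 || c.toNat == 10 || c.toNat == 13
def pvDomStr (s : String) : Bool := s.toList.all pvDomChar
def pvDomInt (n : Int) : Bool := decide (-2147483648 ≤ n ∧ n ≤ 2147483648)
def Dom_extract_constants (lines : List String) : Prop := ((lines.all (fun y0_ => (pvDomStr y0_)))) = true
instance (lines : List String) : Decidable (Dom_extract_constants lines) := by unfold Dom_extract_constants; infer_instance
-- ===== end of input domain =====

-- B drops A's incremental ordered-accumulator dedup entirely: it gathers the comma-free
-- candidate characters, dedups with an UNORDERED set and recovers first-occurrence order by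
-- SORTING the set on each character's first index in the candidate stream.
-- Pre_ excludes the inputs where A raises ValueError (a qualifying line without ')').

-- ===== PORT A =====
-- the inner 'while line[c] != "," and line[c] not in unique_constants: append' — runs at
-- most once per check since the append makes the membership test true
def pyWhileA (s : String) (acc : List String) : List String :=
  if s ≠ "," ∧ s ∉ acc then pyWhileA s (acc ++ [s]) else acc
termination_by (if s ∈ acc then 0 else 1)
decreasing_by
  simp_all

def extract_constants (lines : List String) : List String :=
  lines.foldl (fun acc line =>
    if (PySem.Str.isIn "(" line && !(PySem.Str.isIn "formulas(assumptions)" line)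
        && !(PySem.Str.isIn "end_of_list" line)) then
      (PySem.List.pyRange (PySem.Str.find line "(" + 1) (PySem.Str.find line ")" - 1) 1).foldl
        (fun acc2 c =>
          match PySem.Str.pyGet? line c with
          | some ch => pyWhileA (String.ofList [ch]) acc2
          | none => acc2) acc     -- unreachable under Pre_: every index of the range is in bounds
    else acc) []

-- ===== PORT B =====
def extract_constants_alt (lines : List String) : List String :=
  let candidates : List Char := lines.foldl (fun cs line =>
    if (PySem.Str.isIn "(" line && !(PySem.Str.isIn "formulas(assumptions)" line)
        && !(PySem.Str.isIn "end_of_list" line)) then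
      cs ++ ((PySem.Str.slice line (some (PySem.Str.find line "(" + 1))
               (some (max (PySem.Str.find line ")" - 1) 0))).toList.filter
              (fun c => decide (c ≠ ',')))
    else cs) []
  -- key candidates.index(c): always succeeds on the set's elements, ported totally with getD 0;
  -- the key is injective on the set, so the sorted result is iteration-order independent
  (PySem.List.sorted (PySem.Set.ofList candidates)
      (fun c => (PySem.List.index? candidates c).getD 0) false).map
    (fun c => String.ofList [c])

-- ===== PRECONDITION & SPEC =====
-- Pre_ excludes exactly the inputs on which the Python A raises ValueError:
-- a line that contains '(' and neither guard substring, but no ')' (str.index fails).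
def Pre_extract_constants (lines : List String) : Prop :=
  ∀ line ∈ lines,
    (PySem.Str.isIn "(" line && !(PySem.Str.isIn "formulas(assumptions)" line)
        && !(PySem.Str.isIn "end_of_list" line)) = true →
    PySem.Str.isIn ")" line = true
instance (lines : List String) : Decidable (Pre_extract_constants lines) := by
  unfold Pre_extract_constants; infer_instance

def pvWitness_extract_constants : List String := ["p(a,b).", "end_of_list", "q(c)."]

def Spec_extract_constants (lines : List String) (out : List String) : Prop := out = extract_constants_alt lines
instance (lines : List String) (out : List String) : Decidable (Spec_extract_constants lines out) := by unfold Spec_extract_constants; infer_instance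

-- ===== CLAIM (what is proved, stated in full; the proofs are below) =====
def Claim_equal_extract_constants : Prop := ∀ (lines : List String), Dom_extract_constants lines → Pre_extract_constants lines → Spec_extract_constants lines (extract_constants lines)

-- ===== LEMMAS AND PROOFS =====

-- the character-insertion step A performs, as one function
def pvIns (acc : List String) (ch : Char) : List String :=
  if String.ofList [ch] ≠ "," ∧ String.ofList [ch] ∉ acc then acc ++ [String.ofList [ch]] else acc

-- the characters a single line contributes (the raw slice, commas included)
def pvChars (line : String) : List Char :=
  if (PySem.Str.isIn "(" line && !(PySem.Str.isIn "formulas(assumptions)" line)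
      && !(PySem.Str.isIn "end_of_list" line)) then
    (PySem.Str.slice line (some (PySem.Str.find line "(" + 1))
      (some (max (PySem.Str.find line ")" - 1) 0))).toList
  else []

theorem pvSingleton_comma (ch : Char) : (String.ofList [ch] = ",") ↔ ch = ',' := by
  constructor <;> intro h
  · have := congrArg String.toList h; simpa using this
  · subst h; rfl

theorem pvSingleton_inj (a b : Char) : (String.ofList [a] = String.ofList [b]) ↔ a = b := by
  constructor <;> intro h
  · have := congrArg String.toList h; simpa using this
  · subst h; rfl

theorem pyWhileA_eq (s : String) (acc : List String) :
    pyWhileA s acc = if s ≠ "," ∧ s ∉ acc then acc ++ [s] else acc := by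
  rw [pyWhileA]
  split_ifs with h
  · rw [pyWhileA]; simp
  · rfl

theorem pvRange_nil (a b : Int) (h : b ≤ a) : PySem.List.pyRange a b 1 = [] := by
  simp [PySem.List.pyRange_of_pos, h, show (0:Int) < 1 by norm_num]

theorem foldl_pyRange_get {β : Type} (xs : List Char) (f : β → Char → β) :
    ∀ (n : Nat) (a : Int) (init : β), 0 ≤ a → a + n ≤ xs.length →
      (PySem.List.pyRange a (a + n) 1).foldl
          (fun acc j => match PySem.List.pyGet? xs j with
            | some ch => f acc ch
            | none => acc) init
        = (List.take n (List.drop a.toNat xs)).foldl f init := by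
  intro n
  induction n with
  | zero =>
    intro a init h0 hb
    have h : a + ((0 : Nat) : Int) = a := by push_cast; ring
    rw [h, pvRange_nil a a le_rfl]
    simp
  | succ m ih =>
    intro a init h0 hb
    have hlt : a < a + ((m : Nat) + 1 : Nat) := by push_cast; omega
    rw [PySem.List.pyRange_one_cons hlt]
    have hidx : a.toNat < xs.length := by omega
    have hget : PySem.List.pyGet? xs a = some xs[a.toNat] :=
      PySem.List.pyGet?_eq_some_getElem xs h0 (by omega)
    have hdrop : List.drop a.toNat xs = xs[a.toNat] :: List.drop (a.toNat + 1) xs :=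
      List.drop_eq_getElem_cons hidx
    have hb' : a + 1 + (m : Nat) ≤ xs.length := by push_cast at hb ⊢; omega
    have hrw : a + ((m : Nat) + 1 : Nat) = (a + 1) + (m : Nat) := by push_cast; ring
    simp only [List.foldl_cons, hget]
    rw [hrw, ih (a + 1) (f init xs[a.toNat]) (by omega) hb']
    have h1 : (a + 1).toNat = a.toNat + 1 := by omega
    rw [h1, hdrop, List.take_succ_cons, List.foldl_cons]

theorem foldl_pyRange_get' {β : Type} (xs : List Char) (f : β → Char → β)
    (a b : Int) (init : β) (h0 : 0 ≤ a) (hb : b ≤ xs.length) :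
    (PySem.List.pyRange a b 1).foldl
        (fun acc j => match PySem.List.pyGet? xs j with
          | some ch => f acc ch
          | none => acc) init
      = (List.take (b - a).toNat (List.drop a.toNat xs)).foldl f init := by
  by_cases h : b ≤ a
  · rw [pvRange_nil a b h]
    have : (b - a).toNat = 0 := by omega
    simp [this]
  · obtain ⟨n, hn⟩ : ∃ n : Nat, b = a + (n : Int) := ⟨(b - a).toNat, by omega⟩
    subst hn
    rw [foldl_pyRange_get xs f n a init h0 hb]
    have h2 : (a + (n : Int) - a).toNat = n := by omega
    rw [h2]

-- per-line: A's inner index loop equals folding pvIns over the line's slice characters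
theorem pvLine_eq (line : String) (acc : List String) :
    (if (PySem.Str.isIn "(" line && !(PySem.Str.isIn "formulas(assumptions)" line)
        && !(PySem.Str.isIn "end_of_list" line)) then
      (PySem.List.pyRange (PySem.Str.find line "(" + 1) (PySem.Str.find line ")" - 1) 1).foldl
        (fun acc2 c =>
          match PySem.Str.pyGet? line c with
          | some ch => pyWhileA (String.ofList [ch]) acc2
          | none => acc2) acc
    else acc) = (pvChars line).foldl pvIns acc := by
  by_cases hg : (PySem.Str.isIn "(" line && !(PySem.Str.isIn "formulas(assumptions)" line)
      && !(PySem.Str.isIn "end_of_list" line)) = true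
  · have hopen : 0 ≤ PySem.Str.find line "(" := by
      rw [PySem.Str.find_nonneg_iff]
      rw [← PySem.Str.isIn_iff_infix]
      simp only [Bool.and_eq_true] at hg
      exact hg.1.1
    have hclose : PySem.Str.find line ")" ≤ (line.toList.length : Int) := by
      have := PySem.Chars.find_le_length line.toList ")".toList
      simpa using this
    rw [if_pos hg]
    unfold pvChars
    rw [if_pos hg]
    have hstep : ∀ (acc2 : List String) (c : Int),
        (match PySem.Str.pyGet? line c with
          | some ch => pyWhileA (String.ofList [ch]) acc2
          | none => acc2)
        = (match PySem.List.pyGet? line.toList c with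
          | some ch => pvIns acc2 ch
          | none => acc2) := by
      intro acc2 c
      have hb : PySem.Str.pyGet? line c = PySem.List.pyGet? line.toList c := by
        simp [PySem.Str.pyGet?_eq]
      rw [hb]
      cases PySem.List.pyGet? line.toList c with
      | none => rfl
      | some ch => simp [pyWhileA_eq, pvIns]
    have hfold :
        (PySem.List.pyRange (PySem.Str.find line "(" + 1) (PySem.Str.find line ")" - 1) 1).foldl
          (fun acc2 c =>
            match PySem.Str.pyGet? line c with
            | some ch => pyWhileA (String.ofList [ch]) acc2
            | none => acc2) acc
        = (PySem.List.pyRange (PySem.Str.find line "(" + 1) (PySem.Str.find line ")" - 1) 1).foldl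
          (fun acc2 c =>
            match PySem.List.pyGet? line.toList c with
            | some ch => pvIns acc2 ch
            | none => acc2) acc := by
      apply PySem.List.foldl_congr_mem
      intro acc2 c _
      exact hstep acc2 c
    rw [hfold]
    rw [foldl_pyRange_get' line.toList pvIns (PySem.Str.find line "(" + 1)
      (PySem.Str.find line ")" - 1) acc (by omega) (by omega)]
    have hsl : (PySem.Str.slice line (some (PySem.Str.find line "(" + 1))
        (some (max (PySem.Str.find line ")" - 1) 0))).toList
        = List.take ((max (PySem.Str.find line ")" - 1) 0).toNat
            - (PySem.Str.find line "(" + 1).toNat)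
            (List.drop (PySem.Str.find line "(" + 1).toNat line.toList) := by
      simp only [PySem.Str.toList_slice, PySem.Chars.slice_eq_listSlice]
      exact PySem.List.slice_toNat line.toList (by omega) (by omega)
    have hnat : (max (PySem.Str.find line ")" - 1) 0).toNat
        - (PySem.Str.find line "(" + 1).toNat
        = (PySem.Str.find line ")" - 1 - (PySem.Str.find line "(" + 1)).toNat := by omega
    rw [hsl, hnat]
  · rw [if_neg hg]
    unfold pvChars
    rw [if_neg hg]
    rfl

-- A's pvIns fold over raw characters = the Char-level ordered dedup of the comma-free
-- characters, rendered as singleton strings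
theorem pvIns_fold_eq (cs : List Char) :
    ∀ (l : List Char),
      cs.foldl pvIns (l.map (fun c => String.ofList [c]))
        = ((cs.filter (fun c => decide (c ≠ ','))).foldl PySem.Set.add l).map
            (fun c => String.ofList [c]) := by
  induction cs with
  | nil => intro l; simp
  | cons c cs ih =>
    intro l
    rw [List.foldl_cons]
    by_cases hc : c = ','
    · subst hc
      rw [show pvIns (l.map (fun c => String.ofList [c])) ',' = l.map (fun c => String.ofList [c])
          by simp [pvIns]]
      rw [ih l]
      simp
    · have hmem : (String.ofList [c] ∈ l.map (fun c => String.ofList [c])) ↔ c ∈ l := by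
        simp only [List.mem_map]
        constructor
        · rintro ⟨x, hx, he⟩; rwa [(pvSingleton_inj x c).mp he] at hx
        · intro h; exact ⟨c, h, rfl⟩
      have hstep : pvIns (l.map (fun c => String.ofList [c])) c
          = (PySem.Set.add l c).map (fun c => String.ofList [c]) := by
        unfold pvIns
        have hadd : PySem.Set.add l c = if c ∈ l then l else l ++ [c] := by
          simp [PySem.Set.add, PySem.Set.contains]
        by_cases hm : c ∈ l
        · rw [if_neg (by simp [hmem, hm]), hadd, if_pos hm]
        · rw [if_pos ⟨fun h => hc ((pvSingleton_comma c).mp h), by simp [hmem, hm]⟩,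
            hadd, if_neg hm]
          simp
      rw [hstep]
      rw [show (c :: cs).filter (fun c => decide (c ≠ ',')) = c :: cs.filter (fun c => decide (c ≠ ','))
          by simp [hc]]
      rw [List.foldl_cons]
      exact ih (PySem.Set.add l c)

-- the ordered dedup of cs lists its elements in increasing order of first index in cs
theorem pvOfList_pairwise_index (cs : List Char) :
    (PySem.Set.ofList cs).Pairwise
      (fun a b => ((PySem.List.index? cs a).getD 0 : Nat) ≤ (PySem.List.index? cs b).getD 0) := by
  induction cs using List.reverseRecOn with
  | nil => simp [PySem.Set.ofList]
  | append_singleton cs x ih =>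
    have hof : PySem.Set.ofList (cs ++ [x]) = PySem.Set.add (PySem.Set.ofList cs) x := by
      simp [PySem.Set.ofList_eq_foldl]
    have hidx : ∀ a ∈ PySem.Set.ofList cs,
        PySem.List.index? (cs ++ [x]) a = PySem.List.index? cs a := by
      intro a ha
      exact PySem.List.index?_append_of_mem [x] ((PySem.Set.mem_ofList _ _).mp ha)
    have hpw : (PySem.Set.ofList cs).Pairwise
        (fun a b => ((PySem.List.index? (cs ++ [x]) a).getD 0 : Nat)
          ≤ (PySem.List.index? (cs ++ [x]) b).getD 0) := by
      refine List.Pairwise.imp_of_mem ?_ ih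
      intro a b ha hb h
      rw [hidx a ha, hidx b hb]
      exact h
    rw [hof]
    have hadd : PySem.Set.add (PySem.Set.ofList cs) x
        = if x ∈ PySem.Set.ofList cs then PySem.Set.ofList cs else PySem.Set.ofList cs ++ [x] := by
      simp [PySem.Set.add, PySem.Set.contains]
    by_cases hm : x ∈ PySem.Set.ofList cs
    · rw [hadd, if_pos hm]; exact hpw
    · rw [hadd, if_neg hm]
      have hxcs : x ∉ cs := fun h => hm ((PySem.Set.mem_ofList _ _).mpr h)
      have hxi : PySem.List.index? (cs ++ [x]) x = some cs.length :=
        PySem.List.index?_append_singleton_self cs x hxcs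
      rw [List.pairwise_append]
      refine ⟨hpw, List.pairwise_singleton _ _, ?_⟩
      intro a ha b hb
      rw [List.mem_singleton] at hb; subst hb
      rw [hidx a ha, hxi]
      have hamem : a ∈ cs := (PySem.Set.mem_ofList _ _).mp ha
      obtain ⟨k, hk⟩ := Option.isSome_iff_exists.mp
        ((PySem.List.index?_isSome_iff cs a).mpr hamem)
      obtain ⟨hklt, -, -⟩ := PySem.List.getElem_of_index?_eq_some hk
      rw [hk]
      simpa using Nat.le_of_lt hklt

-- ===== VERDICT (by name: the statement is the Claim_ definition above) =====
theorem extract_constants_spec : Claim_equal_extract_constants := by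
  intro lines _ _
  unfold Spec_extract_constants
  unfold extract_constants extract_constants_alt
  -- A side: per line, rewrite to the pvIns fold over pvChars, then flatten
  rw [PySem.List.foldl_congr_mem lines _
    (fun acc line => (pvChars line).foldl pvIns acc) []
    (fun acc line _ => pvLine_eq line acc)]
  rw [← List.foldl_flatMap]
  -- B side: candidates = the comma-free filter of the same flat stream
  rw [PySem.List.foldl_congr_mem lines _
    (fun cs line => cs ++ (pvChars line).filter (fun c => decide (c ≠ ','))) []
    (by
      intro cs line _
      show _ = cs ++ (pvChars line).filter (fun c => decide (c ≠ ','))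
      unfold pvChars
      by_cases h : (PySem.Str.isIn "(" line && !(PySem.Str.isIn "formulas(assumptions)" line)
          && !(PySem.Str.isIn "end_of_list" line)) = true
      · rw [if_pos h, if_pos h]
      · rw [if_neg h, if_neg h]; simp)]
  rw [PySem.List.foldl_append_eq_flatMap (fun line => (pvChars line).filter (fun c => decide (c ≠ ','))) lines []]
  rw [List.nil_append, ← List.filter_flatMap]
  simp only []
  -- both sides are now about ds := filter (≠ ',') (flatMap pvChars lines)
  have hA := pvIns_fold_eq (lines.flatMap pvChars) []
  simp only [List.map_nil] at hA
  rw [hA]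
  rw [← PySem.Set.ofList_eq_foldl]
  -- B: the sort by first index is the identity on the ordered dedup
  rw [PySem.List.sorted_eq_self_of_pairwise _ _
    (pvOfList_pairwise_index ((lines.flatMap pvChars).filter (fun c => decide (c ≠ ','))))]
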